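-- pv_equiv track=rewrite | github.com/ChaoticKittyVN/Scenario_Tool | core/base_project_files_validator.py | compare_validations
-- ===== SOURCE A (Python) =====
-- def compare_validations(project_results, source_results):
--     """对比项目库和资源库的验证结果"""
--     comparison = {}
--
--     for file_type in project_results:
--         project_files = project_results[file_type]
--         source_files = source_results.get(file_type, {})
--
--         # 找出项目库缺失但资源库存在的文件
--         missing_in_project_but_in_source = [
--             filename for filename, project_file in project_files.items()
--             if not project_file and source_files.get(filename)
--         ]
--
--         # 找出两个库都缺失的文件
--         missing_in_both = [
--             filename for filename, project_file in project_files.items()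
--             if not project_file and not source_files.get(filename)
--         ]
--
--         # 找出文件名不一致的情况
--         inconsistent_files = [
--             filename for filename, project_file in project_files.items()
--             if project_file and source_files.get(filename) and
--                project_file != source_files[filename]
--         ]
--
--         comparison[file_type] = {
--             'missing_in_project_but_in_source': missing_in_project_but_in_source,
--             'missing_in_both': missing_in_both,
--             'inconsistent_files': inconsistent_files
--         }
--
--     return comparison
-- ===== SOURCE B (Python) =====
-- KEYS = ('missing_in_project_but_in_source', 'missing_in_both', 'inconsistent_files')
--
--
-- def _classify(project_file, src):
--     """Decision table: map one (project value, source value) pair to its bucket name (or None)."""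
--     if not project_file:
--         return KEYS[0] if src else KEYS[1]
--     if src and project_file != src:
--         return KEYS[2]
--     return None
--
--
-- def compare_validations(project_results, source_results):
--     """Tag each file with its bucket name, then group the tags into a pre-keyed bucket dict."""
--     comparison = {}
--     for file_type, project_files in project_results.items():
--         source_files = source_results.get(file_type, {})
--         tagged = [(tag, filename)
--                   for filename, project_file in project_files.items()
--                   for tag in (_classify(project_file, source_files.get(filename)),)
--                   if tag]
--         buckets = {key: [] for key in KEYS}
--         for tag, filename in tagged:
--             buckets[tag].append(filename)
--         comparison[file_type] = buckets
--     return comparison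
-- ===== Notes on version B (the rewrite author's own statement) =====
-- stated objective: alternative
-- what changed: A filters each file dict three times with three compound boolean comprehensions; B runs a decision-table classifier once per file to produce (bucket-name, filename) tags and then groups the tags into a pre-keyed bucket dict (classify-then-group-by instead of three filter passes).
import Mathlib
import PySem

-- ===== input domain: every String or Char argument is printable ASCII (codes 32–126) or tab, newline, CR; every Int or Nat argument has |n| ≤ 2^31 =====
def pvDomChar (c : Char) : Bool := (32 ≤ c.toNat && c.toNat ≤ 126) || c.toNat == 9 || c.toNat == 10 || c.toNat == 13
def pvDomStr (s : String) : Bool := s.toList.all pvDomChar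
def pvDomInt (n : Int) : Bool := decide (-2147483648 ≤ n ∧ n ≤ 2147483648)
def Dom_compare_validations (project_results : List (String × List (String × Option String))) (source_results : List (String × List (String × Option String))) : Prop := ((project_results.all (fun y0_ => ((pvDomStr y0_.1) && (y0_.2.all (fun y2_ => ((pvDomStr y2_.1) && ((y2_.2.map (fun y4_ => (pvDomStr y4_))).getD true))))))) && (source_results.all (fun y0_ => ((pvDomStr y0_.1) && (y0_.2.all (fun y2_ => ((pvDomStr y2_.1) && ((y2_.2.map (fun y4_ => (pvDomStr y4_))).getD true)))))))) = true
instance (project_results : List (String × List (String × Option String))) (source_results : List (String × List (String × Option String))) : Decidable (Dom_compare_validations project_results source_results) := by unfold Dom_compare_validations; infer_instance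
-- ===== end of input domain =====

-- B replaces A's three filtering comprehensions by classify-then-group-by: a decision-table
-- classifier tags each file with its bucket name and the tags are grouped into a pre-keyed
-- bucket dict; same return value ('alternative' decomposition, not claimed faster).

-- ===== PORT A =====
-- Python truthiness of an Optional[str] value
def cvTruthy (o : Option String) : Bool :=
  match o with
  | none => false
  | some s => !(s == "")

-- truthiness of source_files.get(filename)
def cvGetTruthy (d : PySem.Dict String (Option String)) (k : String) : Bool :=
  match d.get? k with
  | none => false
  | some o => cvTruthy o

def compare_validations (project_results : List (String × List (String × Option String))) (source_results : List (String × List (String × Option String))) : List (String × List (String × List String)) :=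
  let srd := PySem.Dict.ofList source_results
  ((PySem.Dict.ofList project_results).items.foldl (fun comparison p =>
      let file_type := p.1
      let project_files := PySem.Dict.ofList p.2
      let source_files := PySem.Dict.ofList (srd.getD file_type [])
      let missing_in_project_but_in_source :=
        (project_files.items.filter (fun q =>
          !cvTruthy q.2 && cvGetTruthy source_files q.1)).map (·.1)
      let missing_in_both :=
        (project_files.items.filter (fun q =>
          !cvTruthy q.2 && !cvGetTruthy source_files q.1)).map (·.1)
      let inconsistent_files :=
        (project_files.items.filter (fun q =>
          cvTruthy q.2 &&
            (match source_files.get? q.1 with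
             | none => false
             | some v => cvTruthy v && decide (q.2 ≠ v)))).map (·.1)
      comparison.insert file_type
        [("missing_in_project_but_in_source", missing_in_project_but_in_source),
         ("missing_in_both", missing_in_both),
         ("inconsistent_files", inconsistent_files)]
    ) PySem.Dict.empty).items

-- ===== PORT B =====
-- the KEYS tuple of Source B
def cvKeys : List String :=
  ["missing_in_project_but_in_source", "missing_in_both", "inconsistent_files"]

-- _classify: decision table from (project value, source_files.get(filename)) to a bucket name
def cvClassify (project_file : Option String) (src : Option (Option String)) : Option String :=
  if !cvTruthy project_file then
    (if (match src with | none => false | some o => cvTruthy o) then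
       some "missing_in_project_but_in_source"
     else some "missing_in_both")
  else if (match src with | none => false | some o => cvTruthy o && decide (project_file ≠ o)) then
    some "inconsistent_files"
  else none

-- the tagging comprehension: [(tag, filename) … if tag]
def cvTagged (source_files : PySem.Dict String (Option String))
    (items : List (String × Option String)) : List (String × String) :=
  items.filterMap (fun q =>
    match cvClassify q.2 (source_files.get? q.1) with
    | some tag => some (tag, q.1)
    | none => none)

-- buckets = {key: [] for key in KEYS}; for tag, filename in tagged: buckets[tag].append(filename)
def cvBucketDict (tagged : List (String × String)) : PySem.Dict String (List String) :=
  tagged.foldl (fun d p => d.modify p.1 [] (· ++ [p.2]))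
    (PySem.Dict.ofList (cvKeys.map (fun k => (k, []))))

def compare_validations_alt (project_results : List (String × List (String × Option String))) (source_results : List (String × List (String × Option String))) : List (String × List (String × List String)) :=
  let srd := PySem.Dict.ofList source_results
  ((PySem.Dict.ofList project_results).items.foldl (fun comparison p =>
      let source_files := PySem.Dict.ofList (srd.getD p.1 [])
      let tagged := cvTagged source_files (PySem.Dict.ofList p.2).items
      comparison.insert p.1 (cvBucketDict tagged).items
    ) PySem.Dict.empty).items

-- ===== PRECONDITION & SPEC =====
def Spec_compare_validations (project_results : List (String × List (String × Option String))) (source_results : List (String × List (String × Option String))) (out : List (String × List (String × List String))) : Prop := out = compare_validations_alt project_results source_results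
instance (project_results : List (String × List (String × Option String))) (source_results : List (String × List (String × Option String))) (out : List (String × List (String × List String))) : Decidable (Spec_compare_validations project_results source_results out) := by unfold Spec_compare_validations; infer_instance

-- ===== CLAIM (what is proved, stated in full; the proofs are below) =====
def Claim_equal_compare_validations : Prop := ∀ (project_results : List (String × List (String × Option String))) (source_results : List (String × List (String × Option String))), Dom_compare_validations project_results source_results → Spec_compare_validations project_results source_results (compare_validations project_results source_results)

-- ===== LEMMAS AND PROOFS =====

-- every tag the classifier emits is one of the three bucket names
theorem cvClassify_mem (pf : Option String) (src : Option (Option String)) (t : String)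
    (h : cvClassify pf src = some t) : t ∈ cvKeys := by
  unfold cvClassify at h
  split_ifs at h <;> simp_all [cvKeys]

-- grouping tags drawn from cvKeys leaves the bucket dict's keys exactly cvKeys, in order
theorem cvBucketDict_keys (t : List (String × String)) (ht : ∀ p ∈ t, p.1 ∈ cvKeys) :
    (cvBucketDict t).keys = cvKeys := by
  unfold cvBucketDict
  rw [PySem.Dict.keys_foldl_modify_key]
  have h1 : (PySem.Dict.ofList (cvKeys.map (fun k => ((k : String), ([] : List String))))).keys = cvKeys := by decide
  rw [h1, PySem.Set.update_eq_append_filter]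
  have : (PySem.Set.ofList (t.map (·.1))).filter (fun y => !(PySem.Set.contains cvKeys y)) = [] := by
    rw [List.filter_eq_nil_iff]
    intro a ha
    have ha' : a ∈ t.map (·.1) := (PySem.Set.mem_ofList _ _).1 ha
    obtain ⟨p, hp, rfl⟩ := List.mem_map.1 ha'
    simpa using ht p hp
  rw [this, List.append_nil]

theorem cvBucketDict_nodup (t : List (String × String)) : (cvBucketDict t).keys.Nodup := by
  unfold cvBucketDict
  exact PySem.Dict.nodup_keys_foldl_modify_key _ _ _ _ _ (by decide)

-- each bucket of the group-by holds exactly the filenames whose tag is that bucket's key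
theorem cvBucketDict_getD (t : List (String × String)) (k : String) (hk : k ∈ cvKeys) :
    (cvBucketDict t).getD k [] = (t.filter (fun p => p.1 == k)).map (·.2) := by
  unfold cvBucketDict
  rw [PySem.Dict.getD_foldl_modify_append]
  have : (PySem.Dict.ofList (cvKeys.map (fun k => ((k : String), ([] : List String))))).getD k [] = [] := by
    fin_cases hk <;> decide
  rw [this, List.nil_append]

-- filtering the tag list by a fixed tag is filtering the items by 'classifies to that tag'
theorem cvTagged_filter (sf : PySem.Dict String (Option String))
    (items : List (String × Option String)) (k : String) :
    ((cvTagged sf items).filter (fun p => p.1 == k)).map (·.2)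
      = (items.filter (fun q => cvClassify q.2 (sf.get? q.1) == some k)).map (·.1) := by
  induction items with
  | nil => rfl
  | cons q rest ih =>
    simp only [cvTagged, List.filterMap_cons] at *
    cases hc : cvClassify q.2 (sf.get? q.1) with
    | none => simp [hc, ih]
    | some t =>
      by_cases hk : t = k
      · subst hk; simp [hc, ih]
      · simp [hc, ih, hk]

-- the decision table agrees pointwise with A's three compound predicates
theorem classify_K0 (pf : Option String) (s : Option (Option String)) :
    (cvClassify pf s == some "missing_in_project_but_in_source")
      = (!cvTruthy pf && (match s with | none => false | some o => cvTruthy o)) := by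
  unfold cvClassify
  split_ifs with h1 h2 h3 <;> simp_all

theorem classify_K1 (pf : Option String) (s : Option (Option String)) :
    (cvClassify pf s == some "missing_in_both")
      = (!cvTruthy pf && !(match s with | none => false | some o => cvTruthy o)) := by
  unfold cvClassify
  split_ifs with h1 h2 h3 <;> simp_all

theorem classify_K2 (pf : Option String) (s : Option (Option String)) :
    (cvClassify pf s == some "inconsistent_files")
      = (cvTruthy pf && (match s with | none => false | some o => cvTruthy o && decide (pf ≠ o))) := by
  unfold cvClassify
  split_ifs with h1 h2 h3 <;> simp_all

-- per file type, B's bucket dict lists exactly A's three filtered lists, in A's key order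
theorem cvEntry (sf : PySem.Dict String (Option String)) (items : List (String × Option String)) :
    (cvBucketDict (cvTagged sf items)).items =
      [("missing_in_project_but_in_source",
          (items.filter (fun q => !cvTruthy q.2 && cvGetTruthy sf q.1)).map (·.1)),
       ("missing_in_both",
          (items.filter (fun q => !cvTruthy q.2 && !cvGetTruthy sf q.1)).map (·.1)),
       ("inconsistent_files",
          (items.filter (fun q =>
             cvTruthy q.2 &&
               (match sf.get? q.1 with
                | none => false
                | some v => cvTruthy v && decide (q.2 ≠ v)))).map (·.1))] := by
  have htags : ∀ p ∈ cvTagged sf items, p.1 ∈ cvKeys := by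
    intro p hp
    simp only [cvTagged, List.mem_filterMap] at hp
    obtain ⟨q, _, hq⟩ := hp
    cases hc : cvClassify q.2 (sf.get? q.1) with
    | none => rw [hc] at hq; exact absurd hq (by simp)
    | some t =>
      rw [hc] at hq
      simp only [Option.some.injEq] at hq
      have := cvClassify_mem q.2 (sf.get? q.1) t hc
      cases hq; exact this
  rw [PySem.Dict.items_eq_map_keys _ (cvBucketDict_nodup _) [],
      cvBucketDict_keys _ htags]
  simp only [cvKeys, List.map_cons, List.map_nil]
  rw [cvBucketDict_getD _ _ (by decide), cvBucketDict_getD _ _ (by decide),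
      cvBucketDict_getD _ _ (by decide)]
  rw [cvTagged_filter, cvTagged_filter, cvTagged_filter]
  have h0 : items.filter (fun q => cvClassify q.2 (sf.get? q.1) == some "missing_in_project_but_in_source")
      = items.filter (fun q => !cvTruthy q.2 && cvGetTruthy sf q.1) :=
    List.filter_congr (fun q _ => by rw [classify_K0]; rfl)
  have h1 : items.filter (fun q => cvClassify q.2 (sf.get? q.1) == some "missing_in_both")
      = items.filter (fun q => !cvTruthy q.2 && !cvGetTruthy sf q.1) :=
    List.filter_congr (fun q _ => by rw [classify_K1]; rfl)
  have h2 : items.filter (fun q => cvClassify q.2 (sf.get? q.1) == some "inconsistent_files")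
      = items.filter (fun q => cvTruthy q.2 &&
          (match sf.get? q.1 with
           | none => false
           | some v => cvTruthy v && decide (q.2 ≠ v))) :=
    List.filter_congr (fun q _ => by rw [classify_K2])
  rw [h0, h1, h2]

-- ===== VERDICT (by name: the statement is the Claim_ definition above) =====
theorem compare_validations_spec : Claim_equal_compare_validations := by
  intro pr sr _
  unfold Spec_compare_validations compare_validations compare_validations_alt
  simp only []
  congr 1
  apply PySem.List.foldl_congr_mem
  intro acc p _
  simp only [cvEntry]
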